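-- pv_equiv track=rewrite | github.com/Simon-Mufara/SA_Digi_Health | fastapi_backend/app/api/v1/patients.py | mask_name_to_initials
-- ===== SOURCE A (Python) =====
-- from typing import List, Optional
--
-- def mask_name_to_initials(name: Optional[str]) -> Optional[str]:
--     """Mask full name to initials only (e.g., 'John Smith' -> 'J.S.')"""
--     if not name:
--         return None
--     parts = name.strip().split()
--     if not parts:
--         return None
--     initials = '.'.join(p[0].upper() for p in parts if p) + '.'
--     return initials
-- ===== SOURCE B (Python) =====
-- from typing import Optional
--
-- def mask_name_to_initials(name: Optional[str]) -> Optional[str]: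
--     """Mask full name to initials only, by a single character scan (no split)."""
--     if not name:
--         return None
--     buf = []
--     prev_ws = True
--     for c in name:
--         if not c.isspace() and prev_ws:
--             buf.append(c.upper())
--             buf.append('.')
--         prev_ws = c.isspace()
--     if not buf:
--         return None
--     return ''.join(buf)
-- ===== Notes on version B (the rewrite author's own statement) =====
-- stated objective: simpler
-- what changed: Replaces strip+split+join over a materialized word list by a single character scan with a word-boundary flag that emits the uppercased initial and a dot at each word start.
import Mathlib
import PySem

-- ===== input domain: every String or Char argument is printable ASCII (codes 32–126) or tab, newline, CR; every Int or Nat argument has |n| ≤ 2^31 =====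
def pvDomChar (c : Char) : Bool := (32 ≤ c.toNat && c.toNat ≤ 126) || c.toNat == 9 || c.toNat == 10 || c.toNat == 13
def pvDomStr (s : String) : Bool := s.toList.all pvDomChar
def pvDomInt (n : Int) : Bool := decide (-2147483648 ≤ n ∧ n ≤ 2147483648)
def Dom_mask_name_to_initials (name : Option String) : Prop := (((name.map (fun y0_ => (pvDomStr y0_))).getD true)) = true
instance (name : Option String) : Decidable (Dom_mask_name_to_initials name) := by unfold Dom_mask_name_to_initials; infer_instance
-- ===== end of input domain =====

-- B replaces A's strip+split+join over a word list by a single character scan with a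
-- word-boundary flag (objective: simpler, same O(n) cost).

-- ===== PORT A =====
-- p[0].upper() for a word p; the [] branch is unreached (the comprehension's 'if p' filters it)
def pvInitial (p : List Char) : List Char :=
  match p with
  | [] => []
  | c :: _ => [PySem.Chars.upperChar c]

def mask_name_to_initials (name : Option String) : Option String :=
  match name with
  | none => none
  | some s =>
    if s.toList = [] then none
    else
      let parts := PySem.Chars.split₀ (PySem.Chars.strip s.toList)
      if parts = [] then none
      else some (String.ofList (PySem.Chars.join ['.'] ((parts.filter (fun p => !p.isEmpty)).map pvInitial) ++ ['.']))

-- ===== PORT B =====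
-- the scan loop: buf accumulates, prevWs is the 'previous char was whitespace' flag
def pvScan : List Char → Bool → List Char → List Char
  | [], _, buf => buf
  | c :: rest, prevWs, buf =>
      pvScan rest (PySem.Chars.isspace c)
        (if !PySem.Chars.isspace c && prevWs then buf ++ [PySem.Chars.upperChar c, '.'] else buf)

def mask_name_to_initials_alt (name : Option String) : Option String :=
  match name with
  | none => none
  | some s =>
    if s.toList = [] then none
    else
      let buf := pvScan s.toList true []
      if buf = [] then none
      else some (String.ofList buf)

-- ===== PRECONDITION & SPEC =====
def Spec_mask_name_to_initials (name : Option String) (out : Option String) : Prop := out = mask_name_to_initials_alt name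
instance (name : Option String) (out : Option String) : Decidable (Spec_mask_name_to_initials name out) := by unfold Spec_mask_name_to_initials; infer_instance

-- ===== CLAIM (what is proved, stated in full; the proofs are below) =====
def Claim_equal_mask_name_to_initials : Prop := ∀ (name : Option String), Dom_mask_name_to_initials name → Spec_mask_name_to_initials name (mask_name_to_initials name)

-- ===== LEMMAS AND PROOFS =====

-- 'initial ++ dot' flattening of a word list (what both programs produce)
def pvG (parts : List (List Char)) : List Char := parts.flatMap (fun w => pvInitial w ++ ['.'])

theorem pvG_append (xs ys : List (List Char)) : pvG (xs ++ ys) = pvG xs ++ pvG ys := by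
  simp [pvG]

theorem pvG_eq_nil_iff (parts : List (List Char)) : pvG parts = [] ↔ parts = [] := by
  cases parts with
  | nil => simp [pvG]
  | cons p rest => simp [pvG]

theorem pvScan_peel (cs : List Char) (p : Bool) (buf : List Char) :
    pvScan cs p buf = buf ++ pvScan cs p [] := by
  induction cs generalizing p buf with
  | nil => simp [pvScan]
  | cons c rest ih =>
    simp only [pvScan]
    by_cases h : (!PySem.Chars.isspace c && p) = true
    · simp [h]
      rw [ih, ih (buf := [PySem.Chars.upperChar c, '.'])]
      simp
    · simp [h]
      exact ih _ _

theorem pvInitial_append_singleton (w : List Char) (c : Char) (h : w ≠ []) :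
    pvInitial (w ++ [c]) = pvInitial w := by
  cases w with
  | nil => exact absurd rfl h
  | cons a t => simp [pvInitial]

theorem go_main (cs : List Char) : ∀ (cur : List Char) (acc : List (List Char)),
    pvG (PySem.Chars.split₀.go cs cur acc) =
      pvG acc.reverse ++ pvInitial cur.reverse ++
        (if cur = [] then pvScan cs true [] else '.' :: pvScan cs false []) := by
  induction cs with
  | nil =>
    intro cur acc
    by_cases h : cur = []
    · subst h; simp [PySem.Chars.split₀.go, pvScan, pvInitial]
    · simp [PySem.Chars.split₀.go, List.isEmpty_eq_false_iff.mpr h, h, pvScan]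
      rw [pvG_append]
      simp [pvG]
  | cons d rest ih =>
    intro cur acc
    by_cases hs : PySem.Chars.isspace d = true
    · by_cases h : cur = []
      · subst h
        simp only [PySem.Chars.split₀.go, hs, List.isEmpty_nil, if_true]
        rw [ih [] acc]
        simp [pvScan, hs, pvInitial]
      · simp only [PySem.Chars.split₀.go, hs, if_true, List.isEmpty_eq_false_iff.mpr h,
          Bool.false_eq_true, if_false]
        rw [ih [] (cur.reverse :: acc)]
        rw [show (cur.reverse :: acc).reverse = acc.reverse ++ [cur.reverse] by simp]
        rw [pvG_append]
        simp [pvG, pvScan, hs, h, pvInitial]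
    · simp only [PySem.Chars.split₀.go, hs, Bool.false_eq_true, if_false]
      rw [ih (d :: cur) acc]
      by_cases h : cur = []
      · subst h
        simp [pvScan, hs, pvInitial]
        rw [pvScan_peel rest false [PySem.Chars.upperChar d, '.']]
        simp
      · have hrev : cur.reverse ≠ [] := by simpa using h
        rw [show (d :: cur).reverse = cur.reverse ++ [d] by simp,
          pvInitial_append_singleton _ _ hrev]
        simp [pvScan, hs, h]

theorem split0_scan (cs : List Char) :
    pvG (PySem.Chars.split₀ cs) = pvScan cs true [] := by
  have := go_main cs [] []
  simpa [PySem.Chars.split₀, pvG, pvInitial] using this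

theorem go_words_ne_nil (cs : List Char) : ∀ (cur : List Char) (acc : List (List Char)),
    (∀ w ∈ acc, w ≠ []) → ∀ w ∈ PySem.Chars.split₀.go cs cur acc, w ≠ [] := by
  induction cs with
  | nil =>
    intro cur acc hacc w hw
    by_cases h : cur = []
    · subst h; simp [PySem.Chars.split₀.go] at hw
      exact hacc w (by simpa using hw)
    · simp [PySem.Chars.split₀.go, List.isEmpty_eq_false_iff.mpr h] at hw
      rcases hw with hw | hw
      · exact hacc w (by simpa using hw)
      · subst hw; simpa using h
  | cons d rest ih =>
    intro cur acc hacc w hw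
    by_cases hs : PySem.Chars.isspace d = true
    · by_cases h : cur = []
      · subst h
        simp only [PySem.Chars.split₀.go, hs, List.isEmpty_nil, if_true] at hw
        exact ih [] acc hacc w hw
      · simp only [PySem.Chars.split₀.go, hs, if_true, List.isEmpty_eq_false_iff.mpr h,
          Bool.false_eq_true, if_false] at hw
        refine ih [] (cur.reverse :: acc) ?_ w hw
        intro v hv
        rw [List.mem_cons] at hv
        rcases hv with rfl | hv
        · simpa using h
        · exact hacc v hv
    · simp only [PySem.Chars.split₀.go, hs, Bool.false_eq_true, if_false] at hw
      exact ih (d :: cur) acc hacc w hw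

theorem split0_words_ne_nil (cs : List Char) : ∀ w ∈ PySem.Chars.split₀ cs, w ≠ [] :=
  go_words_ne_nil cs [] [] (by simp)

theorem join_flat (parts : List (List Char)) (h : parts ≠ []) :
    PySem.Chars.join ['.'] (parts.map pvInitial) ++ ['.'] = pvG parts := by
  induction parts with
  | nil => exact absurd rfl h
  | cons p rest ih =>
    cases rest with
    | nil => simp [PySem.Chars.join_singleton, pvG]
    | cons q r =>
      rw [List.map_cons, List.map_cons, PySem.Chars.join_cons_cons,
        show pvG (p :: q :: r) = pvInitial p ++ ['.'] ++ pvG (q :: r) by simp [pvG],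
        ← ih (by simp)]
      simp [List.append_assoc]

theorem split0_ws_cons (c : Char) (cs : List Char) (h : PySem.Chars.isspace c = true) :
    PySem.Chars.split₀ (c :: cs) = PySem.Chars.split₀ cs := by
  show PySem.Chars.split₀.go (c :: cs) [] [] = PySem.Chars.split₀.go cs [] []
  simp only [PySem.Chars.split₀.go, h, List.isEmpty_nil, if_true]

theorem split0_prefix_ws (p : List Char) (cs : List Char)
    (h : ∀ c ∈ p, PySem.Chars.isspace c = true) :
    PySem.Chars.split₀ (p ++ cs) = PySem.Chars.split₀ cs := by
  induction p with
  | nil => simp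
  | cons c t ih =>
    rw [List.cons_append, split0_ws_cons c _ (h c (by simp)), ih (fun d hd => h d (by simp [hd]))]

theorem go_all_ws (t : List Char) (h : ∀ c ∈ t, PySem.Chars.isspace c = true) :
    ∀ cur acc, PySem.Chars.split₀.go t cur acc = PySem.Chars.split₀.go [] cur acc := by
  induction t with
  | nil => intro cur acc; rfl
  | cons c r ih =>
    intro cur acc
    have hc := h c (by simp)
    by_cases hcur : cur = []
    · subst hcur
      simp only [PySem.Chars.split₀.go, hc, List.isEmpty_nil, if_true]
      rw [ih (fun d hd => h d (by simp [hd])) [] acc]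
      simp [PySem.Chars.split₀.go]
    · simp only [PySem.Chars.split₀.go, hc, if_true, List.isEmpty_eq_false_iff.mpr hcur,
        Bool.false_eq_true, if_false]
      rw [ih (fun d hd => h d (by simp [hd])) [] (cur.reverse :: acc)]
      simp [PySem.Chars.split₀.go]

theorem go_append_ws (t : List Char) (ht : ∀ c ∈ t, PySem.Chars.isspace c = true)
    (cs : List Char) : ∀ cur acc,
    PySem.Chars.split₀.go (cs ++ t) cur acc = PySem.Chars.split₀.go cs cur acc := by
  induction cs with
  | nil => intro cur acc; simpa using go_all_ws t ht cur acc
  | cons d rest ih =>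
    intro cur acc
    by_cases hs : PySem.Chars.isspace d = true
    · by_cases h : cur = []
      · subst h
        simp only [List.cons_append, PySem.Chars.split₀.go, hs, List.isEmpty_nil, if_true]
        exact ih [] acc
      · simp only [List.cons_append, PySem.Chars.split₀.go, hs, if_true,
          List.isEmpty_eq_false_iff.mpr h, Bool.false_eq_true, if_false]
        exact ih [] (cur.reverse :: acc)
    · simp only [List.cons_append, PySem.Chars.split₀.go, hs, Bool.false_eq_true, if_false]
      exact ih (d :: cur) acc

theorem split0_suffix_ws (cs t : List Char) (ht : ∀ c ∈ t, PySem.Chars.isspace c = true) :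
    PySem.Chars.split₀ (cs ++ t) = PySem.Chars.split₀ cs := by
  simp [PySem.Chars.split₀, go_append_ws t ht cs]

theorem split0_strip (cs : List Char) :
    PySem.Chars.split₀ (PySem.Chars.strip cs) = PySem.Chars.split₀ cs := by
  have hl : PySem.Chars.split₀ (PySem.Chars.lstrip cs) = PySem.Chars.split₀ cs := by
    conv_rhs => rw [show cs = cs.takeWhile PySem.Chars.isspace ++ cs.dropWhile PySem.Chars.isspace
      from (List.takeWhile_append_dropWhile).symm]
    rw [split0_prefix_ws _ _ (fun c hc => List.mem_takeWhile_imp hc)]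
    rfl
  set d := PySem.Chars.lstrip cs with hd
  have hdec : d = PySem.Chars.rstrip d ++ (d.reverse.takeWhile PySem.Chars.isspace).reverse := by
    simp only [PySem.Chars.rstrip]
    rw [← List.reverse_append, List.takeWhile_append_dropWhile, List.reverse_reverse]
  calc PySem.Chars.split₀ (PySem.Chars.strip cs)
      = PySem.Chars.split₀ (PySem.Chars.rstrip d) := rfl
    _ = PySem.Chars.split₀ (PySem.Chars.rstrip d ++ (d.reverse.takeWhile PySem.Chars.isspace).reverse) := by
        rw [split0_suffix_ws]
        intro c hc
        rw [List.mem_reverse] at hc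
        exact List.mem_takeWhile_imp hc
    _ = PySem.Chars.split₀ d := by rw [← hdec]
    _ = PySem.Chars.split₀ cs := hl

-- ===== VERDICT (by name: the statement is the Claim_ definition above) =====
theorem mask_name_to_initials_spec : Claim_equal_mask_name_to_initials := by
  intro name _
  unfold Spec_mask_name_to_initials
  cases name with
  | none => rfl
  | some s =>
    simp only [mask_name_to_initials, mask_name_to_initials_alt]
    by_cases hcs : s.toList = []
    · simp [hcs]
    · simp only [hcs, if_false]
      set cs := s.toList with hcsdef
      have hparts : PySem.Chars.split₀ (PySem.Chars.strip cs) = PySem.Chars.split₀ cs :=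
        split0_strip cs
      have hbuf : pvScan cs true [] = pvG (PySem.Chars.split₀ cs) := (split0_scan cs).symm
      by_cases hp : PySem.Chars.split₀ cs = []
      · have hbufnil : pvScan cs true [] = [] := by rw [hbuf, hp]; rfl
        simp [hparts, hp, hbufnil]
      · have hne : (∀ w ∈ PySem.Chars.split₀ cs, w ≠ []) := split0_words_ne_nil cs
        have hfilter : (PySem.Chars.split₀ cs).filter (fun p => !p.isEmpty) =
            PySem.Chars.split₀ cs := by
          apply List.filter_eq_self.mpr
          intro w hw
          simpa using hne w hw
        have hbufne : pvScan cs true [] ≠ [] := by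
          rw [hbuf]
          simpa [pvG_eq_nil_iff] using hp
        simp only [hparts, hp, if_false, hbufne, if_false]
        rw [hfilter]
        rw [join_flat _ hp, ← hbuf]
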